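-- pv_equiv track=rewrite | github.com/Kodsport/sakerhetssm-2020-solutions | krypto/konstig-kloss/solution.py | transpose
-- ===== SOURCE A (Python) =====
-- def transpose(m):
--     length = len(m)
--     mt = []
--     for i in range(length):
--         temp = 0
--         for j in range(length):
--             val = (m[j] >> i) & 1
--             temp |= (val << j)
--         mt.append(temp)
--     return mt
-- ===== SOURCE B (Python) =====
-- def transpose(m):
--     length = len(m)
--     grid = [[(m[j] >> i) & 1 for i in range(length)] for j in range(length)]
--     cols = [[row[i] for row in grid] for i in range(length)]
--     return [sum(bit << j for j, bit in enumerate(col)) for col in cols]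
-- ===== Notes on version B (the rewrite author's own statement) =====
-- stated objective: alternative
-- what changed: Instead of A's nested index loops that OR shifted bits into an accumulator, B first materializes the full n-by-n bit grid, transposes it as a table, and then rebuilds each output row by summing enumerated bits shifted into place.
import Mathlib
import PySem

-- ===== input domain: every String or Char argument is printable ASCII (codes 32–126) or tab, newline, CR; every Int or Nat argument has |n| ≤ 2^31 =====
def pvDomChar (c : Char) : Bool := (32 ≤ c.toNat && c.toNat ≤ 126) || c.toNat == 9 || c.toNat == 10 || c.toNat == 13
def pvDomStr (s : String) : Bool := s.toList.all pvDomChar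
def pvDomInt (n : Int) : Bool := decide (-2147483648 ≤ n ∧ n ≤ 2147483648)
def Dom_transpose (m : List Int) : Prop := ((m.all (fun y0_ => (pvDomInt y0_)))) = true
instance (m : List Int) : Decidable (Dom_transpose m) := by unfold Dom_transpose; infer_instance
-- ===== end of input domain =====

-- B re-implements the bit transpose via an explicit bit grid, a table transpose and a
-- sum-of-shifted-bits reconstruction (objective: alternative decomposition, same cost).

-- ===== PORT A =====
-- m[j] with 0 ≤ j < len(m) is ported as m.getD j 0 (always in range here, so exact);
-- Python's >> << & | on ints are Lean's >>> <<< and PySem.Int.band / PySem.Int.bor (exact).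
def transpose (m : List Int) : List Int :=
  let length := m.length
  (List.range length).foldl (fun (mt : List Int) (i : Nat) =>
    mt ++ [(List.range length).foldl (fun (temp : Int) (j : Nat) =>
      PySem.Int.bor temp ((PySem.Int.band ((m.getD j 0) >>> i) 1) <<< j)) 0]) []

-- ===== PORT B =====
def transpose_alt (m : List Int) : List Int :=
  let length := m.length
  let grid := (List.range length).map (fun (j : Nat) =>
    (List.range length).map (fun (i : Nat) => PySem.Int.band ((m.getD j 0) >>> i) 1))
  let cols := (List.range length).map (fun (i : Nat) => grid.map (fun row => row.getD i 0))
  cols.map (fun col =>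
    (PySem.List.enumerate col 0).foldl (fun s p => s + (p.2 <<< p.1.toNat)) 0)

-- ===== PRECONDITION & SPEC =====
def Spec_transpose (m : List Int) (out : List Int) : Prop := out = transpose_alt m
instance (m : List Int) (out : List Int) : Decidable (Spec_transpose m out) := by unfold Spec_transpose; infer_instance

-- ===== CLAIM (what is proved, stated in full; the proofs are below) =====
def Claim_equal_transpose : Prop := ∀ (m : List Int), Dom_transpose m → Spec_transpose m (transpose m)

-- ===== LEMMAS AND PROOFS =====

-- a Nat with no bit at position n ORs with 2^n additively
theorem pvLorPow : ∀ (n a : Nat), a < 2^n → a ||| 2^n = a + 2^n := by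
  intro n
  induction n with
  | zero => intro a h; interval_cases a; decide
  | succ n ih =>
    intro a h
    have h2 : a / 2 < 2^n := by omega
    have ihh := ih (a / 2) h2
    have hdecomp : a = Nat.bit (a.testBit 0) (a / 2) := by
      have := Nat.bit_testBit_zero_shiftRight_one a
      simpa [Nat.shiftRight_one] using this.symm
    have hpow : 2^(n+1) = Nat.bit false (2^n) := by simp [Nat.bit_val]; ring
    rw [hdecomp, hpow, Nat.lor_bit]
    simp only [Nat.bit_val, Bool.or_false, ihh, Nat.mul_add]
    generalize (a.testBit 0).toNat = t
    simp only [Bool.toNat_false]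
    omega

-- every extracted bit (x >> i) & 1 is 0 or 1
theorem pvBand_one_cases (x : Int) : PySem.Int.band x 1 = 0 ∨ PySem.Int.band x 1 = 1 := by
  rw [PySem.Int.band_one]
  have h0 := PySem.Int.mod_nonneg x (b := 2) (by norm_num)
  have h1 := PySem.Int.mod_lt x (b := 2) (by norm_num)
  omega

-- ORing a fresh high bit into a small nonnegative accumulator is addition
theorem pvBorStep (S b : Int) (n : Nat) (hb : b = 0 ∨ b = 1) (h0 : 0 ≤ S) (h1 : S < 2^n) :
    PySem.Int.bor S (b <<< n) = S + b <<< n := by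
  rcases hb with hb | hb
  · simp [hb, Int.shiftLeft_eq]
  · subst hb
    have hsh : (1 : Int) <<< n = (2:Int)^n := by simp [Int.shiftLeft_eq]
    rw [hsh]
    have hS : S = ((S.toNat : Nat) : Int) := by omega
    have hP : ((2:Int)^n) = (((2^n : Nat) : Nat) : Int) := by push_cast; ring
    rw [hS, hP, PySem.Int.bor_natCast]
    have hlt : S.toNat < 2^n := by omega
    rw [pvLorPow n S.toNat hlt]
    push_cast; ring

-- A's OR-accumulator loop equals the plain shifted-bit sum, which stays in [0, 2^n)
theorem pvCore (f : Nat → Int) (hf : ∀ j, f j = 0 ∨ f j = 1) : ∀ (n : Nat),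
    ((List.range n).foldl (fun t j => PySem.Int.bor t (f j <<< j)) 0
      = (List.range n).foldl (fun t j => t + (f j <<< j)) 0)
    ∧ 0 ≤ (List.range n).foldl (fun t j => t + (f j <<< j)) 0
    ∧ (List.range n).foldl (fun t j => t + (f j <<< j)) 0 < 2^n := by
  intro n
  induction n with
  | zero => simp
  | succ n ih =>
    obtain ⟨heq, h0, h1⟩ := ih
    rw [List.range_succ, List.foldl_append, List.foldl_append, heq]
    simp only [List.foldl_cons, List.foldl_nil]
    refine ⟨pvBorStep _ _ _ (hf n) h0 h1, ?_, ?_⟩ <;>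
    · have hsh : f n <<< n = f n * 2^n := Int.shiftLeft_eq _ _
      have hp : (0:Int) < 2^n := by positivity
      have hpow : (2:Int)^(n+1) = 2^n + 2^n := by ring
      rcases hf n with h | h <;> rw [hsh, h] <;> nlinarith

-- B's enumerate-and-sum over a mapped range equals the indexed shifted-bit sum
theorem pvEnumGen (f : Nat → Int) : ∀ (n s : Nat) (acc : Int),
    (PySem.List.enumerate ((List.range' s n).map f) (s : Int)).foldl
        (fun a p => a + (p.2 <<< p.1.toNat)) acc
      = (List.range' s n).foldl (fun t j => t + (f j <<< j)) acc := by
  intro n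
  induction n with
  | zero => intro s acc; simp [PySem.List.enumerate_nil]
  | succ n ih =>
    intro s acc
    rw [List.range'_succ]
    simp only [List.map_cons, PySem.List.enumerate_cons, List.foldl_cons]
    have hcast : ((s : Int) + 1) = ((s + 1 : Nat) : Int) := by push_cast; ring
    rw [hcast, ih (s+1)]
    simp

theorem pvEnumSum (f : Nat → Int) (n : Nat) :
    (PySem.List.enumerate ((List.range n).map f) 0).foldl
        (fun a p => a + (p.2 <<< p.1.toNat)) 0
      = (List.range n).foldl (fun t j => t + (f j <<< j)) 0 := by
  rw [List.range_eq_range']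
  exact pvEnumGen f n 0 0

-- selecting column i from the row grid yields the list of bit (j,i) over j
theorem pvColEq (m : List Int) (n i : Nat) (hi : i < n) :
    ((List.range n).map (fun (j : Nat) =>
        (List.range n).map (fun (k : Nat) => PySem.Int.band ((m.getD j 0) >>> k) 1))).map
        (fun row => row.getD i 0)
      = (List.range n).map (fun (j : Nat) => PySem.Int.band ((m.getD j 0) >>> i) 1) := by
  rw [List.map_map]
  apply List.map_congr_left
  intro j _
  simp [List.getD_eq_getElem?_getD, hi]

-- A's append-accumulator outer loop is a map
theorem pvFoldlAppendMap {α β : Type} (g : α → β) :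
    ∀ (l : List α) (acc : List β), l.foldl (fun acc x => acc ++ [g x]) acc = acc ++ l.map g := by
  intro l
  induction l with
  | nil => simp
  | cons x xs ih => intro acc; simp [ih]

-- ===== VERDICT (by name: the statement is the Claim_ definition above) =====
theorem transpose_spec : Claim_equal_transpose := by
  unfold Claim_equal_transpose
  intro m _
  unfold Spec_transpose transpose transpose_alt
  simp only []
  set n := m.length with hn
  rw [pvFoldlAppendMap, List.map_map]
  simp only [List.nil_append]
  apply List.map_congr_left
  intro i hi
  have hilt : i < n := List.mem_range.mp hi
  simp only [Function.comp]
  rw [pvColEq m n i hilt, pvEnumSum]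
  exact (pvCore _ (fun j => pvBand_one_cases _) n).1
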